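-- pv_equiv track=rewrite | github.com/wuzheng1994/FS-IP | Feature selection/Con_method.py | pattern_dict_func
-- ===== SOURCE A (Python) =====
-- def pattern_dict_func(pattern_num,c):
--     '''calculate the pattern for different class: {(1, 2, 1, 1): [1, 1], (2, 1, 1, 1): [1, 0], (2, 1, 1, 2): [0, 1]}'''
--     pattern_dict = {}
--     for i in range(len(pattern_num)):
--         pattern = tuple(pattern_num[i][0])
--         b = [0] * c
--         if pattern not in pattern_dict:
--             pattern_dict[pattern] = b # The first is pattern number for different classes; the second is the no. of pattern (1, 2, 1, 1): [[1, 1],[(1),(2)]]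
--         # print pattern_num[i][1]
--         pattern_dict[pattern][pattern_num[i][1]-1] += pattern_num[i][2]
--     return pattern_dict
-- ===== SOURCE B (Python) =====
-- def pattern_dict_func(pattern_num, c):
--     # Two-phase group-by: first partition the (class, count) pairs of the entries
--     # by pattern key (first-occurrence order), then aggregate each group into a
--     # fresh [0]*c class-count list.
--     groups = {}
--     for pat, cls, cnt in pattern_num:
--         groups.setdefault(tuple(pat), []).append((cls, cnt))
--     result = {}
--     for k, g in groups.items():
--         b = [0] * c
--         for cls, cnt in g:
--             b[cls - 1] += cnt
--         result[k] = b
--     return result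
-- ===== Notes on version B (the rewrite author's own statement) =====
-- stated objective: alternative
-- what changed: B replaces A's interleaved per-entry update of the result dict with a two-phase group-by: it first partitions the (class, count) pairs into a dict of per-pattern groups, then aggregates each group into a fresh [0]*c list.
import Mathlib
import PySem

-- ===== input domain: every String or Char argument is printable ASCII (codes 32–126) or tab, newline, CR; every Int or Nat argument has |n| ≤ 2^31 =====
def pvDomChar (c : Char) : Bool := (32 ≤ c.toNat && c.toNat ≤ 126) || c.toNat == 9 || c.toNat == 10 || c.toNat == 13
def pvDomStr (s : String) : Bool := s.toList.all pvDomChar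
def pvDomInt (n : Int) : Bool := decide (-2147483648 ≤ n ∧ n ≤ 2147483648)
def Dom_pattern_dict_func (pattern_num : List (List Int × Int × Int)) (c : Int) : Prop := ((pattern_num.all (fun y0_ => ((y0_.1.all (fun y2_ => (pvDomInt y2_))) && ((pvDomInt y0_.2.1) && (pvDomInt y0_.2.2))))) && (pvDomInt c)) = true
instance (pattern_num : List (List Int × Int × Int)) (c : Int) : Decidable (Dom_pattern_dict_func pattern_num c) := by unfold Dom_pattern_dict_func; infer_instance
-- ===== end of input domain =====

-- B re-implements A's interleaved per-entry dict update as a two-phase group-by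
-- (partition (class, count) pairs by pattern key, then aggregate each group);
-- proved to return the same assoc list on Pre_.


-- ===== PORT A =====
-- loop body of A: tuple key, b = [0]*c, conditional first insert, then
-- pattern_dict[pattern][pattern_num[i][1]-1] += pattern_num[i][2]
def pvStepA (c : Int) (d : PySem.Dict (List Int) (List Int)) (e : List Int × Int × Int) :
    PySem.Dict (List Int) (List Int) :=
  let pattern := e.1
  let b : List Int := List.replicate c.toNat 0
  let d1 := if d.contains pattern then d else d.insert pattern b
  let v := d1.getD pattern []
  d1.insert pattern (PySem.List.pySetD v (e.2.1 - 1) (PySem.List.pyGetD v (e.2.1 - 1) 0 + e.2.2))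

def pattern_dict_func (pattern_num : List (List Int × Int × Int)) (c : Int) :
    List (List Int × List Int) :=
  (pattern_num.foldl (pvStepA c) PySem.Dict.empty).items

-- ===== PORT B =====
-- phase 1: groups.setdefault(tuple(pat), []).append((cls, cnt))
-- phase 2: for each group, b = [0]*c and b[cls - 1] += cnt over the group
def pattern_dict_func_alt (pattern_num : List (List Int × Int × Int)) (c : Int) :
    List (List Int × List Int) :=
  let groups : PySem.Dict (List Int) (List (Int × Int)) :=
    pattern_num.foldl (fun d e => d.modify e.1 [] (fun g => g ++ [e.2])) PySem.Dict.empty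
  groups.items.map (fun p =>
    (p.1, p.2.foldl
      (fun b x => PySem.List.pySetD b (x.1 - 1) (PySem.List.pyGetD b (x.1 - 1) 0 + x.2))
      (List.replicate c.toNat 0)))

-- ===== PRECONDITION & SPEC =====
-- Pre_ excludes exactly the inputs on which A raises IndexError: some entry's
-- class index entry[1]-1 falls outside the length-max(c,0) list [0]*c.
def Pre_pattern_dict_func (pattern_num : List (List Int × Int × Int)) (c : Int) : Prop :=
  ∀ e ∈ pattern_num, PySem.Raise.InRange c.toNat (e.2.1 - 1)
instance (pattern_num : List (List Int × Int × Int)) (c : Int) :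
    Decidable (Pre_pattern_dict_func pattern_num c) := by
  unfold Pre_pattern_dict_func PySem.Raise.InRange; infer_instance

def pvWitness_pattern_dict_func : (List (List Int × Int × Int)) × Int :=
  ([([1, 2], 1, 1), ([1, 2], 2, 3), ([2], 1, 5)], 2)

def Spec_pattern_dict_func (pattern_num : List (List Int × Int × Int)) (c : Int)
    (out : List (List Int × List Int)) : Prop := out = pattern_dict_func_alt pattern_num c
instance (pattern_num : List (List Int × Int × Int)) (c : Int) (out : List (List Int × List Int)) :
    Decidable (Spec_pattern_dict_func pattern_num c out) := by
  unfold Spec_pattern_dict_func; infer_instance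

-- ===== CLAIM (what is proved, stated in full; the proofs are below) =====
def Claim_equal_pattern_dict_func : Prop := ∀ (pattern_num : List (List Int × Int × Int)) (c : Int), Dom_pattern_dict_func pattern_num c → Pre_pattern_dict_func pattern_num c → Spec_pattern_dict_func pattern_num c (pattern_dict_func pattern_num c)

-- ===== LEMMAS AND PROOFS =====

-- b[cls - 1] += cnt, the accumulation step both programs perform
def pvUpd (b : List Int) (e : List Int × Int × Int) : List Int :=
  PySem.List.pySetD b (e.2.1 - 1) (PySem.List.pyGetD b (e.2.1 - 1) 0 + e.2.2)

-- canonical form both ports are reduced to: for key k, the fold of pvUpd over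
-- the entries whose key is k (expressed as a guarded fold over all entries)
def pvGroup (pattern_num : List (List Int × Int × Int)) (c : Int) (k : List Int) : List Int :=
  pattern_num.foldl (fun b e => if e.1 == k then pvUpd b e else b) (List.replicate c.toNat 0)

-- a fold whose guard never fires leaves the accumulator unchanged
theorem pvFoldl_if_false {α β : Type} (es : List α) (g : β → α → β) (p : α → Bool) (b : β)
    (h : ∀ x ∈ es, p x = false) :
    es.foldl (fun b x => if p x then g b x else b) b = b := by
  induction es generalizing b with
  | nil => rfl
  | cons y ys ih =>
      have hy := h y (List.mem_cons_self)
      simp only [List.foldl_cons, hy, if_false, Bool.false_eq_true]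
      exact ih b (fun x hx => h x (List.mem_cons_of_mem _ hx))

theorem pvGroup_append (es : List (List Int × Int × Int)) (e : List Int × Int × Int)
    (c : Int) (k : List Int) :
    pvGroup (es ++ [e]) c k = if e.1 == k then pvUpd (pvGroup es c k) e else pvGroup es c k := by
  simp [pvGroup, List.foldl_append]

theorem pvGroup_of_not_mem (es : List (List Int × Int × Int)) (c : Int) (k : List Int)
    (h : k ∉ es.map (·.1)) : pvGroup es c k = List.replicate c.toNat 0 := by
  apply pvFoldl_if_false
  intro x hx
  simp only [beq_eq_false_iff_ne, ne_eq]
  intro hk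
  exact h (List.mem_map.mpr ⟨x, hx, hk⟩)

-- the dict accumulated by A's loop, characterised as a group-by over the keys
theorem pvFoldA_eq (c : Int) (es : List (List Int × Int × Int)) :
    es.foldl (pvStepA c) PySem.Dict.empty =
      PySem.Dict.mk ((PySem.Set.ofList (es.map (·.1))).map
        (fun k => (k, pvGroup es c k))) := by
  induction es using List.reverseRecOn with
  | nil => rfl
  | append_singleton es e ih =>
      rw [List.foldl_append, ih]
      set K : List (List Int) := PySem.Set.ofList (es.map (·.1)) with hK
      set d : PySem.Dict (List Int) (List Int) :=
        PySem.Dict.mk (K.map (fun k => (k, pvGroup es c k))) with hd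
      have hkeys : d.keys = K := by
        simp [hd, PySem.Dict.keys, List.map_map, Function.comp_def]
      have hnd : d.keys.Nodup := by rw [hkeys]; exact PySem.Set.nodup_ofList _
      have hK' : PySem.Set.ofList ((es ++ [e]).map (·.1)) = PySem.Set.add K e.1 := by
        rw [hK]; simp [PySem.Set.ofList, List.foldl_append]
      by_cases hmem : e.1 ∈ es.map (·.1)
      · -- key already present: A overwrites in place, the group list gains e
        have hmemK : e.1 ∈ K := by rw [hK]; exact (PySem.Set.mem_ofList _ _).mpr hmem
        have hcont : d.contains e.1 = true := by
          rw [PySem.Dict.contains_eq_decide_mem_keys, hkeys]; simpa using hmemK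
        have hitems : (e.1, pvGroup es c e.1) ∈ d.items := by
          simp only [hd]
          exact List.mem_map.mpr ⟨e.1, hmemK, rfl⟩
        have hget : d.getD e.1 [] = pvGroup es c e.1 :=
          PySem.Dict.getD_of_mem_items d hitems hnd []
        have hKc : PySem.Set.contains K e.1 = true := List.elem_eq_true_of_mem hmemK
        have hadd : PySem.Set.add K e.1 = K := by
          simp only [PySem.Set.add, hKc, if_true]
        apply PySem.Dict.ext
        simp only [List.foldl_cons, List.foldl_nil, pvStepA, hcont, if_true, hget]
        rw [PySem.Dict.items_insert_of_contains _ _ hcont, hK', hadd]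
        simp only [hd, List.map_map]
        apply List.map_congr_left
        intro k hk
        by_cases hke : k = e.1
        · subst hke
          simp [pvGroup_append, pvUpd]
        · have hb : (k == e.1) = false := by simpa using hke
          have hb' : (e.1 == k) = false := by simpa using (Ne.symm hke)
          simp [hb', hke, pvGroup_append]
      · -- fresh key: A appends, and the group-by appends the new group at the end
        have hmemK : e.1 ∉ K := by rw [hK]; simpa using (PySem.Set.mem_ofList (es.map (·.1)) e.1).not.mpr hmem
        have hcont : d.contains e.1 = false := by
          rw [PySem.Dict.contains_eq_decide_mem_keys, hkeys]; simpa using hmemK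
        have hKc : PySem.Set.contains K e.1 = false := by
          rw [Bool.eq_false_iff]
          exact fun h => hmemK (List.mem_of_elem_eq_true h)
        have hadd : PySem.Set.add K e.1 = K ++ [e.1] := by
          simp only [PySem.Set.add, hKc, Bool.false_eq_true, if_false]
        have hcont1 : (d.insert e.1 (List.replicate c.toNat 0)).contains e.1 = true :=
          PySem.Dict.contains_insert_self _ _ _
        have hget1 : (d.insert e.1 (List.replicate c.toNat 0)).getD e.1 [] =
            List.replicate c.toNat 0 := PySem.Dict.getD_insert_self _ _ _ _
        apply PySem.Dict.ext
        simp only [List.foldl_cons, List.foldl_nil, pvStepA, hcont, if_false,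
          Bool.false_eq_true, hget1]
        rw [PySem.Dict.items_insert_of_contains _ _ hcont1,
          PySem.Dict.items_insert_of_not_contains _ _ hcont, hK', hadd]
        simp only [hd, List.map_append, List.map_map]
        congr 1
        · apply List.map_congr_left
          intro k hk
          have hke : k ≠ e.1 := fun h => hmemK (h ▸ hk)
          have hb : (k == e.1) = false := by simpa using hke
          have hb' : (e.1 == k) = false := by simpa using (Ne.symm hke)
          simp [hb', hke, pvGroup_append]
        · simp [pvGroup_append, pvGroup_of_not_mem es c e.1 hmem, pvUpd]

-- B's two-phase group-by, reduced to the same canonical form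
theorem pvAlt_eq (c : Int) (es : List (List Int × Int × Int)) :
    pattern_dict_func_alt es c =
      (PySem.Set.ofList (es.map (·.1))).map (fun k => (k, pvGroup es c k)) := by
  unfold pattern_dict_func_alt
  dsimp only
  set groups : PySem.Dict (List Int) (List (Int × Int)) :=
    es.foldl (fun d e => d.modify e.1 [] (fun g => g ++ [e.2])) PySem.Dict.empty with hg
  have hkeys : groups.keys = PySem.Set.ofList (es.map (·.1)) := by
    rw [hg, PySem.Dict.keys_foldl_modify_key es (·.1) [] (fun _ x g => g ++ [x.2])]
    simp [PySem.Dict.keys_empty, PySem.Set.ofList, PySem.Set.update]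
  have hnd : groups.keys.Nodup := by rw [hkeys]; exact PySem.Set.nodup_ofList _
  rw [PySem.Dict.items_eq_map_keys groups hnd [], hkeys, List.map_map]
  apply List.map_congr_left
  intro k hk
  have hgetD : groups.getD k [] = (es.filter (fun e => e.1 == k)).map (·.2) := by
    rw [hg, PySem.Dict.getD_foldl_modify_append es PySem.Dict.empty k]
    simp [PySem.Dict.getD_empty]
  simp only [Function.comp_def, hgetD]
  rw [List.foldl_map, List.foldl_filter]
  rfl

-- ===== VERDICT (by name: the statement is the Claim_ definition above) =====
theorem pattern_dict_func_spec : Claim_equal_pattern_dict_func := by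
  intro pattern_num c _ _
  unfold Spec_pattern_dict_func pattern_dict_func
  rw [pvFoldA_eq, pvAlt_eq]
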